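-- pv_equiv track=rewrite | github.com/gereleth/aoc_python | src/year2023/day12.py | count_single_num_placements
-- ===== SOURCE A (Python) =====
-- def fits(chars: str, num: int, index: int):
--     """
--     Check if we can place a span of size num at index in chars
--     """
--     cc = chars[index : index + num]
--     if len(cc) < num or "." in cc:
--         return False
--     before = index - 1
--     if before > 0 and chars[before] == "#":
--         return False
--     after = index + num
--     if after < len(chars) and chars[after] == "#":
--         return False
--     return True
--
-- def count_single_num_placements(chars, num):
--     """
--     Count ways we can place a single span of size num in this string
--     """
--     first_broken = next((i for i, c in enumerate(chars) if c == "#"), len(chars))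
--     if first_broken < len(chars):
--         start = first_broken - num + 1
--         end = first_broken
--         n = 0
--         for index in range(start, end + 1):
--             if fits(chars, num, index):
--                 n += int("#" not in chars[index + num + 1 :])
--         return n
--     n = 0
--     for c, char in enumerate(chars[: len(chars) - num + 1]):
--         if char == ".":
--             continue
--         n += fits(chars, num, c)
--     return n
-- ===== SOURCE B (Python) =====
-- def count_single_num_placements(chars, num):
--     """
--     Count ways we can place a single span of size num in this string
--     """
--     L = len(chars)
--     # prefix counts of '.': dots[i] = number of '.' among chars[:i]
--     dots = [0] * (L + 1)
--     for i, c in enumerate(chars):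
--         dots[i + 1] = dots[i] + (c == ".")
--     hashes = [i for i, c in enumerate(chars) if c == "#"]
--     if hashes:
--         first, last = hashes[0], hashes[-1]
--         # a span starting at i covers every '#' iff last - num + 1 <= i <= first,
--         # and it is free of '.' iff the dot-prefix-counts at its ends agree
--         lo = max(0, last - num + 1)
--         hi = min(first, L - num)
--         return sum(1 for i in range(lo, hi + 1) if dots[i + num] == dots[i])
--     return sum(1 for i, c in enumerate(chars)
--                if i + num <= L and c != "." and dots[i + num] == dots[i])
-- ===== Notes on version B (the rewrite author's own statement) =====
-- stated objective: faster
-- what changed: B replaces A's per-candidate string slicing and substring scans (O(L) work per candidate start) by one pass building prefix counts of '.' plus the first/last '#' positions, answering each candidate in O(1).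
-- outside the precondition, e.g. on count_single_num_placements('..a', -1): A returns 1, B returns 0; on count_single_num_placements('a', -5): A raises IndexError, B raises IndexError
import Mathlib
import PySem

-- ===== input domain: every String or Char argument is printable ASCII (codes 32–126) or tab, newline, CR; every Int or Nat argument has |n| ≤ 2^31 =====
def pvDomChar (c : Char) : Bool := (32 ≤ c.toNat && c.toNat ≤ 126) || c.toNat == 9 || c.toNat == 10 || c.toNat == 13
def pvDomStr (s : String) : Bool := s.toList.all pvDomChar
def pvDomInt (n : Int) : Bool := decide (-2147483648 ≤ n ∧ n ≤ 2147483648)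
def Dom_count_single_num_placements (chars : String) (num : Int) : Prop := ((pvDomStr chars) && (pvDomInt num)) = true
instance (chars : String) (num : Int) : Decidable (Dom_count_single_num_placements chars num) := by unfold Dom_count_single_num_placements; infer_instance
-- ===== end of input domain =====

-- B replaces A's per-candidate string slicing by one pass building prefix counts of '.' and the
-- first/last '#' positions (measured faster); proved equal to A for every string and every num ≥ 0.

-- ===== PORT A =====
-- '"." in cc' / '"#" in tail' are single-character substring tests = list membership (exact on any string)
def pvFits (l : List Char) (num : Int) (index : Int) : Bool :=
  let cc := PySem.List.slice l (some index) (some (index + num))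
  if (PySem.List.len cc < num) || cc.contains '.' then false
  else
    let before := index - 1
    if before > 0 && (PySem.List.pyGet? l before == some '#') then false
    else
      let after := index + num
      if after < PySem.List.len l && (PySem.List.pyGet? l after == some '#') then false
      else true

-- next((i for i, c in enumerate(chars) if c == "#"), len(chars))
def pvFirstBroken (l : List Char) : Int :=
  (((PySem.List.enumerate l 0).find? (fun p => p.2 == '#')).map (·.1)).getD (PySem.List.len l)

def count_single_num_placements (chars : String) (num : Int) : Int :=
  let l := chars.toList
  let first_broken := pvFirstBroken l
  if first_broken < PySem.List.len l then
    let start := first_broken - num + 1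
    let stop := first_broken
    (PySem.List.pyRange start (stop + 1) 1).foldl
      (fun n index =>
        if pvFits l num index then
          n + (if (PySem.List.slice l (some (index + num + 1)) none).contains '#' then 0 else 1)
        else n) 0
  else
    (PySem.List.enumerate (PySem.List.slice l none (some (PySem.List.len l - num + 1))) 0).foldl
      (fun n p => if p.2 == '.' then n else n + (if pvFits l num p.1 then 1 else 0)) 0

-- ===== PORT B =====
-- dots[0] = 0; the loop appends dots[i+1] = dots[i] + (c == '.') cell by cell
def pvDots (l : List Char) : List Int :=
  l.foldl (fun d c => d ++ [(d.getLast?.getD 0) + (if c == '.' then 1 else 0)]) [0]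

-- [i for i, c in enumerate(chars) if c == "#"]
def pvHashes (l : List Char) : List Int :=
  ((PySem.List.enumerate l 0).filter (fun p => p.2 == '#')).map (·.1)

def count_single_num_placements_alt (chars : String) (num : Int) : Int :=
  let l := chars.toList
  let L := PySem.List.len l
  let dots := pvDots l
  let hashes := pvHashes l
  if hashes ≠ [] then
    let first := PySem.List.pyGetD hashes 0 0
    let last := PySem.List.pyGetD hashes (-1) 0
    let lo := max 0 (last - num + 1)
    let hi := min first (L - num)
    (PySem.List.pyRange lo (hi + 1) 1).foldl
      (fun n i => if PySem.List.pyGetD dots (i + num) 0 == PySem.List.pyGetD dots i 0 then n + 1 else n) 0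
  else
    (PySem.List.enumerate l 0).foldl
      (fun n p => if p.1 + num ≤ L && p.2 != '.' && (PySem.List.pyGetD dots (p.1 + num) 0 == PySem.List.pyGetD dots p.1 0) then n + 1 else n) 0

-- ===== PRECONDITION & SPEC =====
-- Pre_ restricts to the function's natural domain num ≥ 0 (a span has a nonnegative size): for negative
-- num A indexes the string with negative positions, raising IndexError on some inputs and wrapping around
-- the string end on others, behaviour no caller relies on.
def Pre_count_single_num_placements (chars : String) (num : Int) : Prop := 0 ≤ num
instance (chars : String) (num : Int) : Decidable (Pre_count_single_num_placements chars num) := by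
  unfold Pre_count_single_num_placements; infer_instance

def pvWitness_count_single_num_placements : String × Int := ("?#?.", 2)

def Spec_count_single_num_placements (chars : String) (num : Int) (out : Int) : Prop := out = count_single_num_placements_alt chars num
instance (chars : String) (num : Int) (out : Int) : Decidable (Spec_count_single_num_placements chars num out) := by unfold Spec_count_single_num_placements; infer_instance

-- ===== CLAIM (what is proved, stated in full; the proofs are below) =====
def Claim_equal_count_single_num_placements : Prop := ∀ (chars : String) (num : Int), Dom_count_single_num_placements chars num → Pre_count_single_num_placements chars num → Spec_count_single_num_placements chars num (count_single_num_placements chars num)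

-- ===== LEMMAS AND PROOFS =====

-- number of '.' among the first j characters
def pvCnt (l : List Char) (j : Nat) : Nat := (l.take j).countP (· == '.')

theorem pvDots_eq (l : List Char) :
    pvDots l = (List.range (l.length + 1)).map (fun j => (pvCnt l j : Int)) := by
  induction l using List.reverseRecOn with
  | nil => simp [pvDots, pvCnt]
  | append_singleton xs c ih =>
    have h1 : pvDots (xs ++ [c]) = pvDots xs ++ [((pvDots xs).getLast?.getD 0) + (if c == '.' then 1 else 0)] := by
      simp [pvDots, List.foldl_append]
    rw [h1, ih]
    have hlast : ((List.range (xs.length + 1)).map (fun j => (pvCnt xs j : Int))).getLast?.getD 0 = (pvCnt xs xs.length : Int) := by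
      rw [List.getLast?_eq_getElem?]
      simp
    rw [hlast]
    have hlen : (xs ++ [c]).length + 1 = (xs.length + 1) + 1 := by simp
    rw [hlen]
    conv_rhs => rw [List.range_succ, List.map_append]
    congr 1
    · apply List.map_congr_left
      intro j hj
      simp only [List.mem_range] at hj
      have : (xs ++ [c]).take j = xs.take j := List.take_append_of_le_length (by omega)
      simp [pvCnt, this]
    · simp only [List.map_cons, List.map_nil]
      congr 1
      have h2 : (xs ++ [c]).take (xs.length + 1) = xs ++ [c] := by
        apply List.take_of_length_le; simp
      simp only [pvCnt, h2, List.countP_append]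
      have h3 : xs.take xs.length = xs := by simp
      rw [h3]
      by_cases hc : c = '.'
      · simp [hc]
      · simp [hc]

theorem pvDots_getD (l : List Char) (j : Nat) (hj : j ≤ l.length) :
    PySem.List.pyGetD (pvDots l) (j : Int) 0 = (pvCnt l j : Int) := by
  rw [pvDots_eq, PySem.List.pyGetD_natCast]
  rw [List.getD_eq_getElem?_getD]
  simp [List.getElem?_map, List.getElem?_range (by omega : j < l.length + 1)]

theorem pvCnt_window (l : List Char) (j k : Nat) (h : j + k ≤ l.length) :
    pvCnt l (j + k) = pvCnt l j ↔ ((l.drop j).take k).contains '.' = false := by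
  unfold pvCnt
  rw [List.take_add, List.countP_append]
  have hz : ((l.drop j).take k).countP (· == '.') = 0 ↔ '.' ∉ (l.drop j).take k := by
    simp only [List.countP_eq_zero, beq_iff_eq]
    exact ⟨fun h hm => h _ hm rfl, fun h x hx hxe => h (hxe ▸ hx)⟩
  have hc : ((l.drop j).take k).contains '.' = false ↔ '.' ∉ (l.drop j).take k := by simp
  rw [hc, ← hz]
  omega

-- generic: the "next(...)" expression is idxOf (helper by induction, generalizing the enumerate start)

theorem pvFind_enum (l : List Char) (s : Int) :
    (((PySem.List.enumerate l s).find? (fun p => p.2 == '#')).map (·.1)).getD (s + l.length) = s + (l.idxOf '#' : Int) := by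
  induction l generalizing s with
  | nil => simp [PySem.List.enumerate_nil]
  | cons c t ih =>
    rw [PySem.List.enumerate_cons, List.find?_cons]
    by_cases hc : c = '#'
    · simp [hc, List.idxOf_cons]
    · have hpred : (((s, c) : Int × Char).2 == '#') = false := by simp [hc]
      rw [hpred]
      have hih := ih (s + 1)
      have hco : (c == '#') = false := by simp [hc]
      rw [List.length_cons, List.idxOf_cons, hco]
      simp only [cond_false]
      push_cast
      rw [show s + ((t.length : Int) + 1) = (s + 1) + t.length by ring, hih]
      ring

theorem pvFirstBroken_eq (l : List Char) : pvFirstBroken l = (l.idxOf '#' : Int) := by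
  have := pvFind_enum l 0
  simpa [pvFirstBroken, PySem.List.len_eq] using this

theorem pvHashes_mem (l : List Char) (x : Int) :
    x ∈ pvHashes l ↔ ∃ j : Nat, x = (j : Int) ∧ ∃ hj : j < l.length, l[j] = '#' := by
  unfold pvHashes
  simp only [List.mem_map, List.mem_filter, PySem.List.mem_enumerate_iff]
  constructor
  · rintro ⟨⟨a, b⟩, ⟨⟨j, hj, heq⟩, hb⟩, hx⟩
    cases heq
    refine ⟨j, by simpa using hx.symm, hj, by simpa using hb⟩
  · rintro ⟨j, hx, hj, hc⟩
    exact ⟨((j : Int), l[j]), ⟨⟨j, hj, by simp⟩, by simp [hc]⟩, by simp [hx]⟩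

theorem pvHashes_pairwise (l : List Char) : (pvHashes l).Pairwise (· < ·) := by
  unfold pvHashes
  exact List.Pairwise.map _ (fun a b h => h) ((PySem.List.pairwise_lt_enumerate l 0).filter _)

theorem pvHashes_ne_nil_iff (l : List Char) : pvHashes l ≠ [] ↔ '#' ∈ l := by
  constructor
  · intro h
    rcases List.exists_mem_of_ne_nil _ h with ⟨x, hx⟩
    rcases (pvHashes_mem l x).1 hx with ⟨j, _, hj, hc⟩
    exact hc ▸ List.getElem_mem hj
  · intro h hnil
    have hj := List.idxOf_lt_length_iff.2 h
    have : ((l.idxOf '#' : Nat) : Int) ∈ pvHashes l := by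
      rw [pvHashes_mem]
      exact ⟨l.idxOf '#', rfl, hj, List.getElem_idxOf hj⟩
    rw [hnil] at this
    simp at this

theorem pvCountP_pyRange_aux (p : Int → Bool) (n : Nat) : ∀ (a : Int),
    (((PySem.List.pyRange a (a + n) 1).countP p : Int)) = ((Finset.Ico a (a + (n : Int))).filter (fun i => p i = true)).card := by
  induction n with
  | zero => intro a; simp [PySem.List.pyRange_one_eq_nil (by omega : a + (0:Int) ≤ a)]
  | succ m ih =>
    intro a
    rw [PySem.List.pyRange_one_cons (by push_cast; omega : a < a + ((m+1 : Nat) : Int)), List.countP_cons]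
    rw [← Finset.insert_Ico_add_one_left_eq_Ico (by push_cast; omega : a < a + ((m+1 : Nat) : Int))]
    have h1 : a + ((m+1 : Nat) : Int) = (a + 1) + (m : Int) := by push_cast; ring
    rw [h1]
    have h2 := ih (a + 1)
    by_cases hp : p a = true
    · simp only [Finset.filter_insert, hp, if_true]
      rw [Finset.card_insert_of_notMem (by simp)]
      push_cast at h2 ⊢
      omega
    · simp only [Finset.filter_insert, hp, if_false]
      push_cast at h2 ⊢
      omega

theorem pvCountP_pyRange (p : Int → Bool) (a b : Int) :
    ((PySem.List.pyRange a b 1).countP p : Int) = ((Finset.Ico a b).filter (fun i => p i = true)).card := by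
  by_cases hab : b ≤ a
  · rw [PySem.List.pyRange_one_eq_nil hab]
    simp [Finset.Ico_eq_empty (by omega : ¬ a < b)]
  · have hb : b = a + ((b - a).toNat : Int) := by omega
    rw [hb, pvCountP_pyRange_aux]

theorem pvIdxOf_min (l : List Char) (a : Char) (j : Nat) (hj : j < l.length) (h : j < l.idxOf a) :
    ¬ l[j] = a := by
  intro he
  have hmem : a ∈ l := he ▸ List.getElem_mem hj
  have htk : a ∈ l.take (j + 1) := by
    have hjt : j < (l.take (j + 1)).length := by simp [List.length_take]; omega
    have hg : (l.take (j + 1))[j] = l[j] := List.getElem_take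
    exact he ▸ hg ▸ List.getElem_mem hjt
  have := (List.mem_take_iff_idxOf_lt hmem).1 htk
  omega

theorem pvLeGetLast (l : List Int) (h : l.Pairwise (· < ·)) (x : Int) (hx : x ∈ l) (hne : l ≠ []) :
    x ≤ l.getLast hne := by
  rcases List.mem_iff_getElem.1 hx with ⟨i, hi, rfl⟩
  rw [List.getLast_eq_getElem]
  rcases Nat.lt_or_ge i (l.length - 1) with hlt | hge
  · exact le_of_lt (List.pairwise_iff_getElem.1 h i (l.length - 1) hi (by omega) hlt)
  · have : i = l.length - 1 := by omega
    subst this; exact le_refl _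

theorem pvHeadLe (h0 : Int) (t : List Int) (h : (h0 :: t).Pairwise (· < ·)) (x : Int) (hx : x ∈ h0 :: t) :
    h0 ≤ x := by
  rcases List.mem_cons.1 hx with rfl | hxt
  · exact le_refl _
  · exact le_of_lt ((List.pairwise_cons.1 h).1 x hxt)

theorem pvMemDrop (l : List Char) (d : Nat) (c : Char) :
    c ∈ l.drop d ↔ ∃ m, ∃ hm : m < l.length, d ≤ m ∧ l[m] = c := by
  constructor
  · intro h
    rcases List.mem_iff_getElem.1 h with ⟨i, hi, hg⟩
    have hlen : i < l.length - d := by simpa [List.length_drop] using hi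
    refine ⟨d + i, by omega, by omega, ?_⟩
    rw [← List.getElem_drop (h := hi)]
    exact hg
  · rintro ⟨m, hm, hd, hc⟩
    rw [List.mem_iff_getElem]
    refine ⟨m - d, by simp only [List.length_drop]; omega, ?_⟩
    rw [List.getElem_drop]
    have h2 : d + (m - d) = m := by omega
    simp only [h2]
    exact hc

theorem pvFits_neg (l : List Char) (k : Nat) (hL : 1 ≤ l.length) (hk : 1 ≤ k) (i : Int) (hi : i < 0) (hik : 0 < i + (k : Int)) :
    pvFits l (k : Int) i = false := by
  have hnat : (PySem.List.slice l (some i) (some (i + (k : Int)))).length < k := by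
    rw [PySem.List.length_slice]
    simp only [PySem.List.clampIdx]
    split_ifs <;> omega
  have hcond : ((PySem.List.len (PySem.List.slice l (some i) (some (i + (k : Int)))) < (k : Int) : Bool)
      || (PySem.List.slice l (some i) (some (i + (k : Int)))).contains '.') = true := by
    rw [Bool.or_eq_true]
    left
    rw [decide_eq_true_eq, PySem.List.len_eq]
    exact_mod_cast hnat
  simp only [pvFits]
  rw [if_pos hcond]

theorem pvFits_iff (l : List Char) (k j : Nat) :
    pvFits l (k : Int) (j : Int) = true ↔
      ((k = 0 ∨ j + k ≤ l.length) ∧ ((l.drop j).take k).contains '.' = false ∧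
       ¬(2 ≤ j ∧ l[j - 1]? = some '#') ∧ ¬(j + k < l.length ∧ l[j + k]? = some '#')) := by
  simp only [pvFits]
  rw [show ((j : Int) + (k : Int)) = ((j : Int) + ((k : Nat) : Int)) from rfl, PySem.List.slice_natCast_add]
  have hlen : (PySem.List.len ((l.drop j).take k) < (k : Int)) ↔ ¬(k = 0 ∨ j + k ≤ l.length) := by
    rw [PySem.List.len_eq]
    simp only [List.length_take, List.length_drop]
    constructor
    · intro h; omega
    · intro h; omega
  have hbef : ((j : Int) - 1 > 0 && (PySem.List.pyGet? l ((j : Int) - 1) == some '#')) = true ↔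
      (2 ≤ j ∧ l[j - 1]? = some '#') := by
    rw [Bool.and_eq_true]
    by_cases hj2 : 2 ≤ j
    · rw [show (j : Int) - 1 = ((j - 1 : Nat) : Int) from by omega, PySem.List.pyGet?_natCast]
      simp [hj2]
      omega
    · simp only [decide_eq_true_eq]
      constructor
      · rintro ⟨h1, _⟩; omega
      · rintro ⟨h1, _⟩; omega
  have haft : ((j : Int) + (k : Int) < PySem.List.len l && (PySem.List.pyGet? l ((j : Int) + (k : Int)) == some '#')) = true ↔
      (j + k < l.length ∧ l[j + k]? = some '#') := by
    rw [Bool.and_eq_true, show ((j : Int) + (k : Int)) = ((j + k : Nat) : Int) from by push_cast; ring,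
        PySem.List.pyGet?_natCast, PySem.List.len_eq]
    simp
    omega
  by_cases h1 : (k = 0 ∨ j + k ≤ l.length)
  · by_cases h2 : ((l.drop j).take k).contains '.' = true
    · have hc : ((PySem.List.len ((l.drop j).take k) < (k:Int) : Bool) || ((l.drop j).take k).contains '.') = true := by
        rw [Bool.or_eq_true]; right; exact h2
      rw [if_pos hc]
      simp only [Bool.false_eq_true, false_iff]
      rintro ⟨-, hcf, -⟩
      rw [h2] at hcf
      cases hcf
    · have hc : ((PySem.List.len ((l.drop j).take k) < (k:Int) : Bool) || ((l.drop j).take k).contains '.') = false := by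
        rw [Bool.or_eq_false_iff]
        refine ⟨?_, by simpa using h2⟩
        rw [decide_eq_false_iff_not, hlen]
        exact not_not_intro h1
      rw [hc]
      simp only [Bool.false_eq_true, if_false]
      by_cases h3 : ((j : Int) - 1 > 0 && (PySem.List.pyGet? l ((j : Int) - 1) == some '#')) = true
      · rw [if_pos h3]
        simp only [Bool.false_eq_true, false_iff]
        rintro ⟨-, -, hnb, -⟩
        exact hnb (hbef.1 h3)
      · rw [if_neg h3]
        by_cases h4 : ((j : Int) + (k : Int) < PySem.List.len l && (PySem.List.pyGet? l ((j : Int) + (k : Int)) == some '#')) = true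
        · rw [if_pos h4]
          simp only [Bool.false_eq_true, false_iff]
          rintro ⟨-, -, -, hna⟩
          exact hna (haft.1 h4)
        · rw [if_neg h4]
          simp only [true_iff]
          refine ⟨h1, by simpa using h2, fun hb => h3 (hbef.2 hb), fun ha => h4 (haft.2 ha)⟩
  · have hc : ((PySem.List.len ((l.drop j).take k) < (k:Int) : Bool) || ((l.drop j).take k).contains '.') = true := by
      rw [Bool.or_eq_true]; left
      rw [decide_eq_true_eq, hlen]
      exact h1
    rw [if_pos hc]
    simp only [Bool.false_eq_true, false_iff]
    rintro ⟨hh, -⟩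
    exact h1 hh

theorem pvDotsBeq (l : List Char) (j k : Nat) (hjk : j + k ≤ l.length) :
    ((PySem.List.pyGetD (pvDots l) ((j : Int) + (k : Int)) 0 == PySem.List.pyGetD (pvDots l) (j : Int) 0) = true)
      ↔ pvCnt l (j + k) = pvCnt l j := by
  rw [show ((j : Int) + (k : Int)) = ((j + k : Nat) : Int) by push_cast; ring]
  rw [pvDots_getD l (j + k) hjk, pvDots_getD l j (by omega)]
  simp

theorem pvBranch1_iff (l : List Char) (k f s : Nat)
    (hfL : f < l.length) (hf : l[f] = '#')
    (hfmin : ∀ j (hj : j < l.length), l[j] = '#' → f ≤ j)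
    (hs : s < l.length) (hsc : l[s] = '#')
    (hsmax : ∀ j (hj : j < l.length), l[j] = '#' → j ≤ s)
    (i : Int) :
    (((f : Int) - (k : Int) + 1 ≤ i ∧ i < (f : Int) + 1) ∧
      (pvFits l (k : Int) i && !(PySem.List.slice l (some (i + (k : Int) + 1)) none).contains '#') = true)
    ↔ ((max 0 ((s : Int) - (k : Int) + 1) ≤ i ∧ i < min (f : Int) ((l.length : Int) - (k : Int)) + 1) ∧
      (PySem.List.pyGetD (pvDots l) (i + (k : Int)) 0 == PySem.List.pyGetD (pvDots l) i 0) = true) := by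
  have hL1 : 1 ≤ l.length := by omega
  have hfs : f ≤ s := hfmin s hs hsc
  by_cases hk0 : k = 0
  · subst hk0
    constructor
    · rintro ⟨⟨h1, h2⟩, -⟩
      exfalso
      simp only [Nat.cast_zero] at h1 h2
      omega
    · rintro ⟨⟨h1, h2⟩, -⟩
      exfalso
      have ha := le_trans (le_max_right (0 : Int) _) h1
      have hb := min_le_left ((f : Int)) ((l.length : Int) - (0 : Nat))
      simp only [Nat.cast_zero] at ha h2 hb
      omega
  · have hk1 : 1 ≤ k := by omega
    constructor
    · rintro ⟨⟨h1, h2⟩, hb⟩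
      rw [Bool.and_eq_true, Bool.not_eq_true'] at hb
      obtain ⟨hfit, hnh⟩ := hb
      have hi0 : 0 ≤ i := by
        by_contra hneg
        push_neg at hneg
        rw [pvFits_neg l k hL1 hk1 i hneg (by omega)] at hfit
        cases hfit
      obtain ⟨j, rfl⟩ : ∃ j : Nat, i = (j : Int) := ⟨i.toNat, (Int.toNat_of_nonneg hi0).symm⟩
      obtain ⟨hlen', hcf, -, hnaft⟩ := (pvFits_iff l k j).1 hfit
      have hjk : j + k ≤ l.length := by rcases hlen' with h | h <;> omega
      have hdropeq : PySem.List.slice l (some ((j : Int) + (k : Int) + 1)) none = l.drop (j + k + 1) := by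
        rw [PySem.List.slice_from l (by omega : (0:Int) ≤ (j : Int) + (k : Int) + 1)]
        have ht : ((j : Int) + (k : Int) + 1).toNat = j + k + 1 := by omega
        rw [ht]
      rw [hdropeq] at hnh
      have hnotmem : '#' ∉ l.drop (j + k + 1) := by simpa using hnh
      have hs_lt : s < j + k := by
        by_contra hge
        push_neg at hge
        rcases Nat.eq_or_lt_of_le hge with heq | hlt2
        · apply hnaft
          have hlt' : j + k < l.length := by omega
          refine ⟨hlt', ?_⟩
          rw [List.getElem?_eq_getElem hlt']
          have hx : l[j + k]'hlt' = '#' := by simp only [heq]; exact hsc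
          rw [hx]
        · apply hnotmem
          rw [pvMemDrop]
          exact ⟨s, hs, by omega, hsc⟩
      refine ⟨⟨max_le (by omega) (by omega), ?_⟩, (pvDotsBeq l j k hjk).2 ((pvCnt_window l j k hjk).2 hcf)⟩
      have hmin := le_min (show (j : Int) ≤ (f : Int) by omega) (show (j : Int) ≤ (l.length : Int) - (k : Int) by omega)
      omega
    · rintro ⟨⟨h1, h2⟩, hdots⟩
      have hi0 : (0 : Int) ≤ i := le_trans (le_max_left _ _) h1
      obtain ⟨j, rfl⟩ : ∃ j : Nat, i = (j : Int) := ⟨i.toNat, (Int.toNat_of_nonneg hi0).symm⟩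
      have hjf : j ≤ f := by have := min_le_left ((f : Int)) ((l.length : Int) - (k : Int)); omega
      have hjkL : j + k ≤ l.length := by have := min_le_right ((f : Int)) ((l.length : Int) - (k : Int)); omega
      have hsk : s < j + k := by have := le_max_right (0 : Int) ((s : Int) - (k : Int) + 1); omega
      have hcf := (pvCnt_window l j k hjkL).1 ((pvDotsBeq l j k hjkL).1 hdots)
      refine ⟨⟨by omega, by omega⟩, ?_⟩
      rw [Bool.and_eq_true, Bool.not_eq_true']
      refine ⟨(pvFits_iff l k j).2 ⟨Or.inr hjkL, hcf, ?_, ?_⟩, ?_⟩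
      · rintro ⟨h2j, hbef⟩
        have hlt : j - 1 < l.length := by omega
        rw [List.getElem?_eq_getElem hlt] at hbef
        have := hfmin _ hlt (by simpa using hbef)
        omega
      · rintro ⟨hlt, haft⟩
        rw [List.getElem?_eq_getElem hlt] at haft
        have := hsmax _ hlt (by simpa using haft)
        omega
      · have hdropeq : PySem.List.slice l (some ((j : Int) + (k : Int) + 1)) none = l.drop (j + k + 1) := by
          rw [PySem.List.slice_from l (by omega : (0:Int) ≤ (j : Int) + (k : Int) + 1)]
          have ht : ((j : Int) + (k : Int) + 1).toNat = j + k + 1 := by omega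
          rw [ht]
        rw [hdropeq]
        have hnm : '#' ∉ l.drop (j + k + 1) := by
          rw [pvMemDrop]
          rintro ⟨m, hm, hdm, hcm⟩
          have := hsmax m hm hcm
          omega
        simpa using hnm

theorem pvBranch2_eq (l : List Char) (k j : Nat) (hj : j < l.length)
    (hno : ∀ m (hm : m < l.length), ¬ l[m] = '#') :
    (!(l[j] == '.') && pvFits l (k : Int) (j : Int)) =
    (((j : Int) + (k : Int) ≤ (l.length : Int)) && (l[j] != '.') &&
      (PySem.List.pyGetD (pvDots l) ((j : Int) + (k : Int)) 0 == PySem.List.pyGetD (pvDots l) (j : Int) 0)) := by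
  rw [Bool.eq_iff_iff]
  simp only [Bool.and_eq_true, Bool.not_eq_true', beq_eq_false_iff_ne, bne_iff_ne, decide_eq_true_eq]
  rw [pvFits_iff]
  constructor
  · rintro ⟨hdot, h1, hcf, -, -⟩
    have hjk : j + k ≤ l.length := by rcases h1 with h | h <;> omega
    refine ⟨⟨by push_cast; omega, hdot⟩, ?_⟩
    exact (pvDotsBeq l j k hjk).2 ((pvCnt_window l j k hjk).2 hcf)
  · rintro ⟨⟨hle, hne⟩, hdots⟩
    have hjk : j + k ≤ l.length := by omega
    have hcf := (pvCnt_window l j k hjk).1 ((pvDotsBeq l j k hjk).1 hdots)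
    refine ⟨hne, Or.inr hjk, hcf, ?_, ?_⟩
    · rintro ⟨h2j, hbef⟩
      have hlt : j - 1 < l.length := by omega
      rw [List.getElem?_eq_getElem hlt] at hbef
      exact hno _ hlt (by simpa using hbef)
    · rintro ⟨hlt, haft⟩
      rw [List.getElem?_eq_getElem hlt] at haft
      exact hno _ hlt (by simpa using haft)

theorem count_single_num_placements_spec' (l : List Char) (k : Nat) :
    count_single_num_placements (String.ofList l) (k : Int) = count_single_num_placements_alt (String.ofList l) (k : Int) := by
  simp only [count_single_num_placements, count_single_num_placements_alt, String.toList_ofList]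
  by_cases hmem : '#' ∈ l
  · -- some '#': branch 1 on both sides
    have hfL : l.idxOf '#' < l.length := List.idxOf_lt_length_iff.2 hmem
    have hgA : pvFirstBroken l < PySem.List.len l := by
      rw [pvFirstBroken_eq, PySem.List.len_eq]
      exact_mod_cast hfL
    have hne : pvHashes l ≠ [] := (pvHashes_ne_nil_iff l).2 hmem
    rw [if_pos hgA, if_pos hne]
    have hf : l[l.idxOf '#'] = '#' := List.getElem_idxOf hfL
    have hfmin : ∀ j (hj : j < l.length), l[j] = '#' → l.idxOf '#' ≤ j := by
      intro j hj hc
      by_contra h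
      push_neg at h
      exact pvIdxOf_min l '#' j hj h hc
    -- first element of hashes
    obtain ⟨h0, t, hht⟩ := List.exists_cons_of_ne_nil hne
    have hfirst : PySem.List.pyGetD (pvHashes l) 0 0 = ((l.idxOf '#' : Nat) : Int) := by
      rw [hht, PySem.List.pyGetD_zero_cons]
      have hh0mem : h0 ∈ pvHashes l := by rw [hht]; exact List.mem_cons_self
      obtain ⟨j0, hj0eq, hj0L, hj0c⟩ := (pvHashes_mem l h0).1 hh0mem
      have hfj0 : l.idxOf '#' ≤ j0 := hfmin j0 hj0L hj0c
      have hfmem : ((l.idxOf '#' : Nat) : Int) ∈ pvHashes l :=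
        (pvHashes_mem l _).2 ⟨l.idxOf '#', rfl, hfL, hf⟩
      have hle : h0 ≤ ((l.idxOf '#' : Nat) : Int) := by
        have hp : (h0 :: t).Pairwise (· < ·) := hht ▸ pvHashes_pairwise l
        exact pvHeadLe h0 t hp _ (hht ▸ hfmem)
      have hge : ((l.idxOf '#' : Nat) : Int) ≤ h0 := by
        rw [hj0eq]
        exact_mod_cast hfj0
      exact le_antisymm hle hge
    -- last element of hashes
    have hlastD := PySem.List.pyGetD_neg_one (pvHashes l) 0 hne
    have hgmem : (pvHashes l).getLast hne ∈ pvHashes l := List.getLast_mem hne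
    obtain ⟨s, hgeq, hsL, hsc⟩ := (pvHashes_mem l _).1 hgmem
    have hlast : PySem.List.pyGetD (pvHashes l) (-1) 0 = ((s : Nat) : Int) := by
      rw [hlastD, hgeq]
    have hsmax : ∀ m (hm : m < l.length), l[m] = '#' → m ≤ s := by
      intro m hm hc
      have hmm : ((m : Nat) : Int) ∈ pvHashes l := (pvHashes_mem l _).2 ⟨m, rfl, hm, hc⟩
      have := pvLeGetLast _ (pvHashes_pairwise l) _ hmm hne
      rw [hgeq] at this
      exact_mod_cast this
    rw [hfirst, hlast, pvFirstBroken_eq]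
    -- folds to counts
    have hbodyA : (fun (n : Int) index => if pvFits l (k : Int) index then n + (if (PySem.List.slice l (some (index + (k : Int) + 1)) none).contains '#' then 0 else 1) else n)
        = (fun (n : Int) index => if (pvFits l (k : Int) index && !(PySem.List.slice l (some (index + (k : Int) + 1)) none).contains '#') = true then n + 1 else n) := by
      funext n i
      by_cases h1 : pvFits l (k : Int) i = true <;>
        by_cases h2 : '#' ∈ PySem.List.slice l (some (i + (k : Int) + 1)) none <;>
        simp [h1, h2]
    rw [hbodyA, PySem.List.foldl_count_if, PySem.List.foldl_count_if]
    rw [zero_add, zero_add, pvCountP_pyRange, pvCountP_pyRange]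
    congr 2
    ext i
    simp only [Finset.mem_filter, Finset.mem_Ico]
    have := pvBranch1_iff l k (l.idxOf '#') s hfL hf hfmin hsL hsc hsmax i
    rw [PySem.List.len_eq]
    constructor
    · rintro ⟨⟨ha, hb⟩, hp⟩
      exact (this.1 ⟨⟨ha, hb⟩, hp⟩).imp (fun h => ⟨h.1, h.2⟩) id
    · rintro ⟨⟨ha, hb⟩, hp⟩
      exact (this.2 ⟨⟨ha, hb⟩, hp⟩).imp (fun h => ⟨h.1, h.2⟩) id
  · -- no '#': branch 2 on both sides
    have hno : ∀ m (hm : m < l.length), ¬ l[m] = '#' := by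
      intro m hm hc
      exact hmem (hc ▸ List.getElem_mem hm)
    have hgA : ¬ (pvFirstBroken l < PySem.List.len l) := by
      rw [pvFirstBroken_eq, PySem.List.len_eq, List.idxOf_eq_length_iff.2 hmem]
      omega
    have hne : ¬ (pvHashes l ≠ []) := by
      simp only [ne_eq, not_not]
      by_contra h
      exact hmem ((pvHashes_ne_nil_iff l).1 h)
    rw [if_neg hgA, if_neg hne]
    -- the sliced prefix A iterates over
    obtain ⟨mA, hsl, hbound⟩ :
        ∃ m : Nat, PySem.List.slice l none (some ((PySem.List.len l) - (k : Int) + 1)) = l.take m ∧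
          (k = 0 ∧ m = l.length + 1 ∨ l.length < min m l.length + k) := by
      rw [PySem.List.len_eq]
      by_cases hkL : k ≤ l.length + 1
      · refine ⟨l.length + 1 - k, ?_, ?_⟩
        · rw [PySem.List.slice_to l (by omega : (0:Int) ≤ (l.length : Int) - (k : Int) + 1)]
          have ht : ((l.length : Int) - (k : Int) + 1).toNat = l.length + 1 - k := by omega
          rw [ht]
        · by_cases hk0 : k = 0
          · exact Or.inl ⟨hk0, by omega⟩
          · exact Or.inr (by omega)
      · refine ⟨l.length - (k - l.length - 1), ?_, by right; omega⟩
        have hb : ((l.length : Int) - (k : Int) + 1) = -(((k - l.length - 1 : Nat) : Int)) := by omega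
        rw [hb, PySem.List.slice_to_neg_natCast l (k - l.length - 1) (by omega)]
    rw [hsl]
    have hbodyA2 : (fun (n : Int) (p : Int × Char) => if p.2 == '.' then n else n + (if pvFits l (k : Int) p.1 then 1 else 0))
        = (fun (n : Int) (p : Int × Char) => if (!(p.2 == '.') && pvFits l (k : Int) p.1) = true then n + 1 else n) := by
      funext n p
      by_cases h1 : (p.2 == '.') = true <;> by_cases h2 : pvFits l (k : Int) p.1 = true <;> simp [h1, h2]
    rw [hbodyA2, PySem.List.foldl_count_if, PySem.List.foldl_count_if, zero_add, zero_add]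
    -- split B's enumeration at mA
    have hsplit : PySem.List.enumerate l 0 =
        PySem.List.enumerate (l.take mA) 0 ++ PySem.List.enumerate (l.drop mA) (0 + (l.take mA).length) := by
      conv_lhs => rw [← List.take_append_drop mA l]
      rw [PySem.List.enumerate_append]
    rw [hsplit, List.countP_append]
    have hdropzero : (PySem.List.enumerate (l.drop mA) (0 + (l.take mA).length)).countP
        (fun p => ((p.1 + (k : Int) ≤ (PySem.List.len l)) && (p.2 != '.') &&
          (PySem.List.pyGetD (pvDots l) (p.1 + (k : Int)) 0 == PySem.List.pyGetD (pvDots l) p.1 0))) = 0 := by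
      rw [List.countP_eq_zero]
      intro p hp
      rw [PySem.List.mem_enumerate_iff] at hp
      obtain ⟨j', hj', rfl⟩ := hp
      have hjlen : j' < l.length - mA := by simpa [List.length_drop] using hj'
      have hlenTake : (l.take mA).length = min mA l.length := by simp [List.length_take]
      simp only [Bool.and_eq_true, decide_eq_true_eq, PySem.List.len_eq, not_and, Bool.not_eq_true]
      intro hcontra
      exfalso
      rw [hlenTake] at hcontra
      rcases hbound with ⟨hk0, hm⟩ | hlt
      · omega
      · push_cast at hcontra
        omega
    rw [hdropzero, Nat.add_zero]
    congr 1
    apply List.countP_congr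
    intro p hp
    rw [PySem.List.mem_enumerate_iff] at hp
    obtain ⟨j, hj, rfl⟩ := hp
    have hjL : j < l.length := by
      have := hj
      simp only [List.length_take] at this
      omega
    have hgt : (l.take mA)[j] = l[j] := List.getElem_take
    simp only [zero_add, hgt]
    rw [PySem.List.len_eq]
    exact iff_of_eq (congrArg (· = true) (pvBranch2_eq l k j hjL hno))

-- ===== VERDICT (by name: the statement is the Claim_ definition above) =====
theorem count_single_num_placements_spec : Claim_equal_count_single_num_placements := by
  intro chars num _ hpre
  unfold Spec_count_single_num_placements
  have h := count_single_num_placements_spec' chars.toList num.toNat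
  rw [Int.toNat_of_nonneg hpre] at h
  rwa [show String.ofList chars.toList = chars from String.ofList_eq.mpr rfl] at h
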